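-- pv_equiv track=rewrite | github.com/langflow-ai/langflow | src/backend/base/langflow/services/specification/service.py | _extract_common_config
-- ===== SOURCE A (Python) =====
-- from typing import Dict, List, Optional
--
-- def _extract_common_config(configs: List[Dict]) -> Dict:
--     """Extract common configuration from list of configs"""
--     if not configs:
--         return {}
--
--     # Simple approach: find keys that appear in most configs
--     key_counts = {}
--     for config in configs:
--         for key in config.keys():
--             key_counts[key] = key_counts.get(key, 0) + 1
--
--     # Return keys that appear in at least half the configs
--     threshold = len(configs) / 2
--     common_config = {}
--     for key, count in key_counts.items():
--         if count >= threshold: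
--             # Get the most common value for this key
--             values = [config.get(key) for config in configs if key in config]
--             # Use the first non-None value as example
--             for value in values:
--                 if value is not None:
--                     common_config[key] = value
--                     break
--
--     return common_config
-- ===== SOURCE B (Python) =====
-- def _extract_common_config(configs):
--     """Extract common configuration from list of configs"""
--     if not configs:
--         return {}
--     n = len(configs)
--     counts = {}
--     first_val = {}
--     # single pass: per-key occurrence count and first non-None example value
--     for config in configs:
--         for key, value in config.items():
--             counts[key] = counts.get(key, 0) + 1
--             if value is not None and key not in first_val:
--                 first_val[key] = value
--     return {key: first_val[key]
--             for key, count in counts.items()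
--             if 2 * count >= n and key in first_val}
-- ===== Notes on version B (the rewrite author's own statement) =====
-- stated objective: alternative
-- what changed: Replaces the per-key rescan of all configs (build values list, then find first non-None) by a single pass that maintains, per key, an occurrence count and the first non-None value, followed by one threshold filter over the counts.
import Mathlib
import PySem

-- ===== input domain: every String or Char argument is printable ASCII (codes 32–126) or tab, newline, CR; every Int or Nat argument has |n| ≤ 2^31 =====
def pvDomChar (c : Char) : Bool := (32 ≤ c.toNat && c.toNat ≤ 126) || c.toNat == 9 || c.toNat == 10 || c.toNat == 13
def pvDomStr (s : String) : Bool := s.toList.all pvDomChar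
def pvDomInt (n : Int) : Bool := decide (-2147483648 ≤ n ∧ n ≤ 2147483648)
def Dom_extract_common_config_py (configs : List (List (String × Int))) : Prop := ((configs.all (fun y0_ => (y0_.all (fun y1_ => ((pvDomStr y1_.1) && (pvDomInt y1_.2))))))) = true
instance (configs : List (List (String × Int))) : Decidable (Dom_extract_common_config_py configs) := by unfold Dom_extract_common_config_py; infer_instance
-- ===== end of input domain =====

-- B replaces A's per-surviving-key rescan of all configs by one pass keeping a count and
-- the first non-None value per key, then a single threshold filter (objective: alternative).


-- ===== PORT A =====
-- a config (Python dict) is its association list; 'config.keys()' is the key list,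
-- 'config.get(key)' / 'key in config' are first-match lookup / key membership.
-- 'count >= len(configs)/2' (true division) on integers is exactly '2*count ≥ len(configs)'.
def extract_common_config_py (configs : List (List (String × Int))) : List (String × Int) :=
  if configs = [] then []
  else
    let key_counts : PySem.Dict String Int :=
      configs.foldl (fun kc config =>
        (config.map (fun p => p.1)).foldl (fun kc key => kc.insert key (kc.getD key 0 + 1)) kc)
        PySem.Dict.empty
    let common : PySem.Dict String Int :=
      key_counts.items.foldl (fun cc kv =>
        if 2 * kv.2 ≥ (configs.length : Int) then
          -- values = [config.get(key) for config in configs if key in config]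
          let values : List (Option Int) :=
            (configs.filter (fun config => (config.map (fun p => p.1)).contains kv.1)).map
              (fun config => List.lookup kv.1 config)
          -- first non-None value, else no entry
          match values.findSome? id with
          | some v => cc.insert kv.1 v
          | none => cc
        else cc) PySem.Dict.empty
    common.items

-- ===== PORT B =====
-- single pass over all (key, value) pairs: counts and first value per key
-- (values are Int here, so Python's 'value is not None' is always true).
def extract_common_config_py_alt (configs : List (List (String × Int))) : List (String × Int) :=
  if configs = [] then []
  else
    let st : PySem.Dict String Int × PySem.Dict String Int :=
      configs.foldl (fun st config =>
        config.foldl (fun st kv =>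
          (st.1.insert kv.1 (st.1.getD kv.1 0 + 1),
           if st.2.contains kv.1 then st.2 else st.2.insert kv.1 kv.2)) st)
        (PySem.Dict.empty, PySem.Dict.empty)
    -- {key: first_val[key] for key, count in counts.items() if 2*count >= n and key in first_val}
    (st.1.items.foldl (fun cc kv =>
        if 2 * kv.2 ≥ (configs.length : Int) ∧ st.2.contains kv.1 = true then
          cc.insert kv.1 (st.2.getD kv.1 0)
        else cc) (PySem.Dict.empty : PySem.Dict String Int)).items

-- ===== PRECONDITION & SPEC =====
def Spec_extract_common_config_py (configs : List (List (String × Int))) (out : List (String × Int)) : Prop := out = extract_common_config_py_alt configs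
instance (configs : List (List (String × Int))) (out : List (String × Int)) : Decidable (Spec_extract_common_config_py configs out) := by unfold Spec_extract_common_config_py; infer_instance

-- ===== CLAIM (what is proved, stated in full; the proofs are below) =====
def Claim_equal_extract_common_config_py : Prop := ∀ (configs : List (List (String × Int))), Dom_extract_common_config_py configs → Spec_extract_common_config_py configs (extract_common_config_py configs)

-- ===== LEMMAS AND PROOFS =====

-- B's inner fold, first component, over one config = A's count update over its keys
theorem pv_counts_inner (config : List (String × Int))
    (st : PySem.Dict String Int × PySem.Dict String Int) :
    (config.foldl (fun st kv =>
      (st.1.insert kv.1 (st.1.getD kv.1 0 + 1),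
       if st.2.contains kv.1 then st.2 else st.2.insert kv.1 kv.2)) st).1
    = (config.map (fun p => p.1)).foldl
        (fun kc key => kc.insert key (kc.getD key 0 + 1)) st.1 := by
  induction config generalizing st with
  | nil => rfl
  | cons kv rest ih => simp [List.foldl_cons, ih]

-- B's fold, first component = A's key_counts fold
theorem pv_counts_eq (configs : List (List (String × Int)))
    (st : PySem.Dict String Int × PySem.Dict String Int) :
    (configs.foldl (fun st config =>
      config.foldl (fun st kv =>
        (st.1.insert kv.1 (st.1.getD kv.1 0 + 1),
         if st.2.contains kv.1 then st.2 else st.2.insert kv.1 kv.2)) st) st).1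
    = configs.foldl (fun kc config =>
        (config.map (fun p => p.1)).foldl
          (fun kc key => kc.insert key (kc.getD key 0 + 1)) kc) st.1 := by
  induction configs generalizing st with
  | nil => rfl
  | cons c rest ih =>
      simp only [List.foldl_cons]
      rw [ih, pv_counts_inner]

-- one step of B's first_val update, seen through get?
theorem pv_fv_step (fv : PySem.Dict String Int) (kv : String × Int) (k : String) :
    (if fv.contains kv.1 then fv else fv.insert kv.1 kv.2).get? k
    = (fv.get? k).or (if k == kv.1 then some kv.2 else none) := by
  cases hc : fv.contains kv.1 with
  | true =>
      simp only [if_true]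
      by_cases hk : k = kv.1
      · rw [PySem.Dict.contains_eq_isSome_get?, ← hk] at hc
        cases h : fv.get? k with
        | none => rw [h] at hc; simp at hc
        | some v => simp
      · simp [hk]
  | false =>
      simp only [Bool.false_eq_true, if_false]
      by_cases hk : k = kv.1
      · subst hk
        have h0 : fv.get? kv.1 = none := by
          rw [PySem.Dict.contains_eq_isSome_get?] at hc
          cases h : fv.get? kv.1 with
          | none => rfl
          | some v => rw [h] at hc; simp at hc
        simp [h0]
      · simp [PySem.Dict.get?_insert, hk]


-- B's inner fold, second component, over one config: get? = previous <|> first match in config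
theorem pv_fv_inner (config : List (String × Int))
    (st : PySem.Dict String Int × PySem.Dict String Int) (k : String) :
    ((config.foldl (fun st kv =>
      (st.1.insert kv.1 (st.1.getD kv.1 0 + 1),
       if st.2.contains kv.1 then st.2 else st.2.insert kv.1 kv.2)) st).2).get? k
    = (st.2.get? k).or (List.lookup k config) := by
  induction config generalizing st with
  | nil => simp
  | cons kv rest ih =>
      simp only [List.foldl_cons, List.lookup]
      rw [ih, pv_fv_step]
      cases h : st.2.get? k with
      | some v => simp
      | none =>
        simp only [Option.or]
        by_cases hk : (k == kv.1) = true <;> simp [hk]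

-- lookup distributes over append as <|>
theorem pv_lookup_append (k : String) (xs ys : List (String × Int)) :
    List.lookup k (xs ++ ys) = (List.lookup k xs).or (List.lookup k ys) := by
  induction xs with
  | nil => simp
  | cons p rest ih =>
      simp only [List.cons_append, List.lookup]
      by_cases h : (k == p.1) = true <;> simp [h, ih]


-- a key is among a config's keys iff its lookup succeeds
theorem pv_contains_iff_lookup (k : String) (c : List (String × Int)) :
    ((c.map (fun p => p.1)).contains k) = (List.lookup k c).isSome := by
  induction c with
  | nil => rfl
  | cons p rest ih =>
      simp only [List.map_cons, List.contains_cons, List.lookup]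
      cases h : (k == p.1) with
      | true => simp [h]
      | false => simpa [h] using ih


-- B's fold, second component: get? = first match in the concatenation of all configs
theorem pv_fv_eq (configs : List (List (String × Int)))
    (st : PySem.Dict String Int × PySem.Dict String Int) (k : String) :
    ((configs.foldl (fun st config =>
      config.foldl (fun st kv =>
        (st.1.insert kv.1 (st.1.getD kv.1 0 + 1),
         if st.2.contains kv.1 then st.2 else st.2.insert kv.1 kv.2)) st) st).2).get? k
    = (st.2.get? k).or (List.lookup k (configs.flatMap id)) := by
  induction configs generalizing st with
  | nil => simp
  | cons c rest ih =>
      simp only [List.foldl_cons, List.flatMap_cons, id]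
      rw [ih, pv_fv_inner]
      cases h : st.2.get? k with
      | some v => simp [pv_lookup_append]
      | none => simp [pv_lookup_append]



-- A's "first non-None value" scan equals the first match over all configs
theorem pv_values_eq (configs : List (List (String × Int))) (k : String) :
    (((configs.filter (fun config => (config.map (fun p => p.1)).contains k)).map
        (fun config => List.lookup k config)).findSome? id)
    = List.lookup k (configs.flatMap id) := by
  induction configs with
  | nil => rfl
  | cons c rest ih =>
      simp only [List.filter_cons, List.flatMap_cons, id_eq, pv_lookup_append]
      rw [pv_contains_iff_lookup]
      cases hl : List.lookup k c with
      | some v =>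
          simp only [hl, Option.isSome_some, if_true, List.map_cons, List.findSome?_cons, id_eq]
          simp
      | none =>
          simp only [Option.isSome_none, Bool.false_eq_true, if_false, Option.none_or]
          simpa using ih

-- ===== VERDICT (by name: the statement is the Claim_ definition above) =====
theorem extract_common_config_py_spec : Claim_equal_extract_common_config_py := by
  intro configs _
  unfold Spec_extract_common_config_py extract_common_config_py extract_common_config_py_alt
  by_cases hne : configs = []
  · simp [hne]
  · simp only [hne, if_false]
    rw [pv_counts_eq (st := (PySem.Dict.empty, PySem.Dict.empty))]
    congr 1
    apply congrArg (List.foldl · PySem.Dict.empty _)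
    funext cc kv
    rw [pv_values_eq]
    have hfv := pv_fv_eq configs (PySem.Dict.empty, PySem.Dict.empty) kv.1
    simp only [PySem.Dict.get?_empty, Option.or] at hfv
    cases hx : List.lookup kv.1 (configs.flatMap id) with
    | none =>
        rw [hx] at hfv
        have hc : (configs.foldl (fun st config =>
            config.foldl (fun st kv =>
              (st.1.insert kv.1 (st.1.getD kv.1 0 + 1),
               if st.2.contains kv.1 then st.2 else st.2.insert kv.1 kv.2)) st)
            ((PySem.Dict.empty, PySem.Dict.empty) :
              PySem.Dict String Int × PySem.Dict String Int)).2.contains kv.1 = false := by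
          rw [PySem.Dict.contains_eq_isSome_get?, hfv]; rfl
        simp [hc]
    | some v =>
        rw [hx] at hfv
        have hc : (configs.foldl (fun st config =>
            config.foldl (fun st kv =>
              (st.1.insert kv.1 (st.1.getD kv.1 0 + 1),
               if st.2.contains kv.1 then st.2 else st.2.insert kv.1 kv.2)) st)
            ((PySem.Dict.empty, PySem.Dict.empty) :
              PySem.Dict String Int × PySem.Dict String Int)).2.contains kv.1 = true := by
          rw [PySem.Dict.contains_eq_isSome_get?, hfv]; rfl
        have hg := PySem.Dict.getD_eq_get?_getD (d := (configs.foldl (fun st config =>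
            config.foldl (fun st kv =>
              (st.1.insert kv.1 (st.1.getD kv.1 0 + 1),
               if st.2.contains kv.1 then st.2 else st.2.insert kv.1 kv.2)) st)
            ((PySem.Dict.empty, PySem.Dict.empty) :
              PySem.Dict String Int × PySem.Dict String Int)).2) (k := kv.1) (d0 := (0:Int))
        rw [hfv] at hg
        simp only [Option.getD] at hg
        by_cases hth : 2 * kv.2 ≥ (configs.length : Int) <;> simp [hc, hg, hth]
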